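-- pv_equiv track=rewrite | github.com/JimJin2050/AdventOfCodePython | day5.py | calculate_at_least_two_lines_overlapped_for_horizontal_vertical_diagonal
-- ===== SOURCE A (Python) =====
-- def calculate_at_least_two_lines_overlapped_for_horizontal_vertical_diagonal(segments, n):
--     marks = [[0] * n for _ in range(n)]
--
--     for segment in segments:
--         start_point, end_point = segment
--         start_x, start_y, end_x, end_y = start_point + end_point
--
--         if start_x == end_x:
--             for idx in range(min(start_y, end_y), max(start_y, end_y) + 1):
--                 marks[start_x][idx] += 1
--         elif start_y == end_y:
--             for idx in range(min(start_x, end_x), max(start_x, end_x) + 1):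
--                 marks[idx][end_y] += 1
--         else:
--             if abs(start_x - end_x) == abs(start_y - end_y):
--                 x1, y1, x2, y2 = start_x, start_y, end_x, end_y
--                 while x1 != x2 and y1 != y2:
--                     marks[x1][y1] += 1
--                     x1 = x1 + 1 if x1 < x2 else x1 - 1
--                     y1 = y1 + 1 if y1 < y2 else y1 - 1
--                 marks[x2][y2] += 1
--             else:
--                 pass
--
--     count = 0
--     for row in range(n):
--         for col in range(n):
--             if marks[row][col] >= 2:
--                 count += 1
--
--     return count
-- ===== SOURCE B (Python) =====
-- def _covers(seg, x, y):
--     (sx, sy), (ex, ey) = seg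
--     if sx == ex:
--         return x == sx and min(sy, ey) <= y <= max(sy, ey)
--     if sy == ey:
--         return y == sy and min(sx, ex) <= x <= max(sx, ex)
--     if abs(sx - ex) != abs(sy - ey):
--         return False
--     return (min(sx, ex) <= x <= max(sx, ex)
--             and (y - sy) * (ex - sx) == (x - sx) * (ey - sy))
--
--
-- def _at_least_two(segments, x, y):
--     seen = False
--     for seg in segments:
--         if _covers(seg, x, y):
--             if seen:
--                 return True
--             seen = True
--     return False
--
--
-- def calculate_at_least_two_lines_overlapped_for_horizontal_vertical_diagonal(segments, n):
--     total = 0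
--     for x in range(n):
--         for y in range(n):
--             if _at_least_two(segments, x, y):
--                 total += 1
--     return total
-- ===== Notes on version B (the rewrite author's own statement) =====
-- stated objective: simpler
-- what changed: B drops A's rasterization entirely: instead of painting every segment point into an n-by-n marks grid and then scanning it, B loops over the grid cells and decides coverage per cell with a closed-form point-on-segment test over the segments, stopping at the second covering segment.
-- outside the precondition, e.g. on calculate_at_least_two_lines_overlapped_for_horizontal_vertical_diagonal([((0, 0), (0, 0)), ((-1, 0), (-1, 0))], 1): A returns 1, B returns 0
import Mathlib
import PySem

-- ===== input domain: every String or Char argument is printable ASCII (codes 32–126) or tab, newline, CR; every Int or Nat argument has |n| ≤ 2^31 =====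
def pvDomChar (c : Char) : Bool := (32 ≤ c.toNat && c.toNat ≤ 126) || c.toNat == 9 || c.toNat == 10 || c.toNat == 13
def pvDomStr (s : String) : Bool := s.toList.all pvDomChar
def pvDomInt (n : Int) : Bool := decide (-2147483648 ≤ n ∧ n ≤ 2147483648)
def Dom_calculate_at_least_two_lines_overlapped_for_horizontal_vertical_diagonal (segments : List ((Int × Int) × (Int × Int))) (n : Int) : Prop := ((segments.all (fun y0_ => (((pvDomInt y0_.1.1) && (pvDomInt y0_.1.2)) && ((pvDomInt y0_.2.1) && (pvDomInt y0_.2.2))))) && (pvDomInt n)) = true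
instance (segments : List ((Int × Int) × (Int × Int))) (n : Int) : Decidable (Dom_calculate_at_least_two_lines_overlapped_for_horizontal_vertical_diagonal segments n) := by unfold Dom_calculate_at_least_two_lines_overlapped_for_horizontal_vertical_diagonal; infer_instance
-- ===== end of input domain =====

-- B drops A's rasterization: no marks grid at all — for each grid cell it decides coverage
-- with a closed-form point-on-segment test over the segments (early exit at the second hit);
-- equivalence is proved on inputs whose aligned segments stay inside the grid (Pre_ below).

-- ===== PORT A =====

-- marks[r][c] += 1 with Python's negative-index wraparound (an index below -len, on which
-- Python raises IndexError, leaves the array unchanged here; Pre_ keeps claims off such inputs)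
def pvBumpA (m : Array (Array Int)) (r c : Int) : Array (Array Int) :=
  m.modify (if r < 0 then r + m.size else r).toNat
    (fun row => row.modify (if c < 0 then c + row.size else c).toNat (· + 1))

-- A's diagonal while-loop; fuel = |x1-x2| is exactly the number of iterations in the
-- branch where it is called (|x1-x2| = |y1-y2|), so the match on fuel 0 IS the loop exit.
def pvDiagGoA (fuel : Nat) (m : Array (Array Int)) (x1 y1 x2 y2 : Int) : Array (Array Int) :=
  match fuel with
  | 0 => pvBumpA m x2 y2
  | f + 1 =>
    if x1 ≠ x2 ∧ y1 ≠ y2 then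
      pvDiagGoA f (pvBumpA m x1 y1) (if x1 < x2 then x1 + 1 else x1 - 1)
        (if y1 < y2 then y1 + 1 else y1 - 1) x2 y2
    else pvBumpA m x2 y2

-- the body of A's 'for segment in segments' loop (the match is Python's tuple unpacking)
def pvASegA (m : Array (Array Int)) (seg : (Int × Int) × (Int × Int)) : Array (Array Int) :=
  match seg with
  | ((sx, sy), (ex, ey)) =>
    if sx = ex then
      (PySem.List.pyRange (min sy ey) (max sy ey + 1)).foldl (fun m idx => pvBumpA m sx idx) m
    else if sy = ey then
      (PySem.List.pyRange (min sx ex) (max sx ex + 1)).foldl (fun m idx => pvBumpA m idx ey) m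
    else if (sx - ex).natAbs = (sy - ey).natAbs then
      pvDiagGoA (sx - ex).natAbs m sx sy ex ey
    else m

-- marks[row][col] with Python's indexing (row, col come from range(n): non-negative, in range)
def pvAGetA (m : Array (Array Int)) (r c : Int) : Int :=
  let row := m.getD (if r < 0 then r + m.size else r).toNat #[]
  row.getD (if c < 0 then c + row.size else c).toNat 0

def calculate_at_least_two_lines_overlapped_for_horizontal_vertical_diagonal (segments : List ((Int × Int) × (Int × Int))) (n : Int) : Int :=
  let marks0 := Array.replicate n.toNat (Array.replicate n.toNat (0 : Int))
  let marks := segments.foldl pvASegA marks0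
  (PySem.List.pyRange 0 n).foldl (fun count row =>
    (PySem.List.pyRange 0 n).foldl (fun count col =>
      if 2 ≤ pvAGetA marks row col then count + 1 else count) count) 0

-- ===== PORT B =====

-- B's _covers: closed-form point-on-segment test
def pvCovers (seg : (Int × Int) × (Int × Int)) (x y : Int) : Bool :=
  match seg with
  | ((sx, sy), (ex, ey)) =>
    if sx = ex then decide (x = sx ∧ min sy ey ≤ y ∧ y ≤ max sy ey)
    else if sy = ey then decide (y = sy ∧ min sx ex ≤ x ∧ x ≤ max sx ex)
    else if (sx - ex).natAbs ≠ (sy - ey).natAbs then false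
    else decide (min sx ex ≤ x ∧ x ≤ max sx ex ∧
                 (y - sy) * (ex - sx) = (x - sx) * (ey - sy))

-- B's _at_least_two: loop over segments with the 'seen' flag and early exit
def pvAtLeastTwoGo (segs : List ((Int × Int) × (Int × Int))) (x y : Int) (seen : Bool) : Bool :=
  match segs with
  | [] => false
  | s :: t =>
    if pvCovers s x y then (if seen then true else pvAtLeastTwoGo t x y true)
    else pvAtLeastTwoGo t x y seen

def calculate_at_least_two_lines_overlapped_for_horizontal_vertical_diagonal_alt (segments : List ((Int × Int) × (Int × Int))) (n : Int) : Int :=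
  (PySem.List.pyRange 0 n).foldl (fun total x =>
    (PySem.List.pyRange 0 n).foldl (fun total y =>
      if pvAtLeastTwoGo segments x y false then total + 1 else total) total) 0

-- ===== PRECONDITION & SPEC =====
-- Pre_ excludes inputs on which A raises IndexError (an aligned segment touching a cell
-- outside [0,n)²) and — a documented narrowing — inputs where an aligned segment has a
-- coordinate in [-n,0), on which Python's negative-index wraparound makes A count the
-- mark at the wrapped cell while B counts the point itself.
def Pre_calculate_at_least_two_lines_overlapped_for_horizontal_vertical_diagonal (segments : List ((Int × Int) × (Int × Int))) (n : Int) : Prop :=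
  ∀ seg ∈ segments,
    (seg.1.1 = seg.2.1 ∨ seg.1.2 = seg.2.2 ∨ (seg.1.1 - seg.2.1).natAbs = (seg.1.2 - seg.2.2).natAbs) →
    (0 ≤ seg.1.1 ∧ seg.1.1 < n ∧ 0 ≤ seg.1.2 ∧ seg.1.2 < n ∧
     0 ≤ seg.2.1 ∧ seg.2.1 < n ∧ 0 ≤ seg.2.2 ∧ seg.2.2 < n)
instance (segments : List ((Int × Int) × (Int × Int))) (n : Int) : Decidable (Pre_calculate_at_least_two_lines_overlapped_for_horizontal_vertical_diagonal segments n) := by unfold Pre_calculate_at_least_two_lines_overlapped_for_horizontal_vertical_diagonal; infer_instance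

def pvWitness_calculate_at_least_two_lines_overlapped_for_horizontal_vertical_diagonal : (List ((Int × Int) × (Int × Int))) × Int :=
  ([((0, 0), (0, 2)), ((0, 1), (0, 2)), ((2, 0), (0, 2))], 3)

def Spec_calculate_at_least_two_lines_overlapped_for_horizontal_vertical_diagonal (segments : List ((Int × Int) × (Int × Int))) (n : Int) (out : Int) : Prop := out = calculate_at_least_two_lines_overlapped_for_horizontal_vertical_diagonal_alt segments n
instance (segments : List ((Int × Int) × (Int × Int))) (n : Int) (out : Int) : Decidable (Spec_calculate_at_least_two_lines_overlapped_for_horizontal_vertical_diagonal segments n out) := by unfold Spec_calculate_at_least_two_lines_overlapped_for_horizontal_vertical_diagonal; infer_instance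

-- ===== CLAIM (what is proved, stated in full; the proofs are below) =====
def Claim_equal_calculate_at_least_two_lines_overlapped_for_horizontal_vertical_diagonal : Prop := ∀ (segments : List ((Int × Int) × (Int × Int))) (n : Int), Dom_calculate_at_least_two_lines_overlapped_for_horizontal_vertical_diagonal segments n → Pre_calculate_at_least_two_lines_overlapped_for_horizontal_vertical_diagonal segments n → Spec_calculate_at_least_two_lines_overlapped_for_horizontal_vertical_diagonal segments n (calculate_at_least_two_lines_overlapped_for_horizontal_vertical_diagonal segments n)

-- ===== LEMMAS AND PROOFS =====

-- the list-world model of A's grid operations (proof-only mirrors of the array port)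
def pvBump (m : List (List Int)) (r c : Int) : List (List Int) :=
  m.modify (if r < 0 then r + m.length else r).toNat
    (fun row => row.modify (if c < 0 then c + row.length else c).toNat (· + 1))

def pvDiagGo (fuel : Nat) (m : List (List Int)) (x1 y1 x2 y2 : Int) : List (List Int) :=
  match fuel with
  | 0 => pvBump m x2 y2
  | f + 1 =>
    if x1 ≠ x2 ∧ y1 ≠ y2 then
      pvDiagGo f (pvBump m x1 y1) (if x1 < x2 then x1 + 1 else x1 - 1)
        (if y1 < y2 then y1 + 1 else y1 - 1) x2 y2
    else pvBump m x2 y2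

def pvASeg (m : List (List Int)) (seg : (Int × Int) × (Int × Int)) : List (List Int) :=
  match seg with
  | ((sx, sy), (ex, ey)) =>
    if sx = ex then
      (PySem.List.pyRange (min sy ey) (max sy ey + 1)).foldl (fun m idx => pvBump m sx idx) m
    else if sy = ey then
      (PySem.List.pyRange (min sx ex) (max sx ex + 1)).foldl (fun m idx => pvBump m idx ey) m
    else if (sx - ex).natAbs = (sy - ey).natAbs then
      pvDiagGo (sx - ex).natAbs m sx sy ex ey
    else m

def pvAGet (m : List (List Int)) (r c : Int) : Int :=
  PySem.List.pyGetD (PySem.List.pyGetD m r []) c 0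

-- the bridge from the array port to the list model
def pvListify (m : Array (Array Int)) : List (List Int) := m.toList.map Array.toList

lemma pvMapModify {α β : Type} (g : α → β) (f : α → α) (f' : β → β)
    (h : ∀ x, g (f x) = f' (g x)) :
    ∀ (l : List α) (i : Nat), (l.modify i f).map g = (l.map g).modify i f' := by
  intro l
  induction l with
  | nil => intro i; simp
  | cons a t ih =>
    intro i
    cases i with
    | zero => simp [List.modify_zero_cons, h]
    | succ j => simp [List.modify_succ_cons, ih]

lemma pvListify_bump (m : Array (Array Int)) (r c : Int) :
    pvListify (pvBumpA m r c) = pvBump (pvListify m) r c := by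
  simp only [pvListify, pvBumpA, pvBump, Array.toList_modify]
  rw [pvMapModify Array.toList
      (fun row => row.modify (if c < 0 then c + row.size else c).toNat (· + 1))
      (fun row => row.modify (if c < 0 then c + row.length else c).toNat (· + 1))
      (fun row => by simp [Array.toList_modify, Array.length_toList])]
  simp [Array.length_toList]

lemma pvListify_diagGo (fuel : Nat) :
    ∀ (m : Array (Array Int)) (x1 y1 x2 y2 : Int),
      pvListify (pvDiagGoA fuel m x1 y1 x2 y2) = pvDiagGo fuel (pvListify m) x1 y1 x2 y2 := by
  induction fuel with
  | zero => intro m x1 y1 x2 y2; simp [pvDiagGoA, pvDiagGo, pvListify_bump]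
  | succ f ih =>
    intro m x1 y1 x2 y2
    by_cases h : x1 ≠ x2 ∧ y1 ≠ y2
    · simp only [pvDiagGoA, pvDiagGo, if_pos h, ih, pvListify_bump]
    · simp only [pvDiagGoA, pvDiagGo, if_neg h, pvListify_bump]

lemma pvListify_foldl_bump (g : Int → Int × Int) (l : List Int) :
    ∀ m : Array (Array Int),
      pvListify (l.foldl (fun m idx => pvBumpA m (g idx).1 (g idx).2) m)
        = l.foldl (fun m idx => pvBump m (g idx).1 (g idx).2) (pvListify m) := by
  induction l with
  | nil => intro m; rfl
  | cons a t ih => intro m; simp only [List.foldl_cons, ih, pvListify_bump]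

lemma pvListify_aseg (m : Array (Array Int)) (seg : (Int × Int) × (Int × Int)) :
    pvListify (pvASegA m seg) = pvASeg (pvListify m) seg := by
  obtain ⟨⟨sx, sy⟩, ex, ey⟩ := seg
  simp only [pvASegA, pvASeg]
  split_ifs with h1 h2 h3
  · exact pvListify_foldl_bump (fun idx => (sx, idx)) _ m
  · exact pvListify_foldl_bump (fun idx => (idx, ey)) _ m
  · exact pvListify_diagGo _ m sx sy ex ey
  · rfl

lemma pvListify_foldSegs (segs : List ((Int × Int) × (Int × Int))) :
    ∀ m : Array (Array Int),
      pvListify (segs.foldl pvASegA m) = segs.foldl pvASeg (pvListify m) := by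
  induction segs with
  | nil => intro m; rfl
  | cons s t ih => intro m; simp only [List.foldl_cons, ih, pvListify_aseg]

lemma pvListify_replicate (k : Nat) :
    pvListify (Array.replicate k (Array.replicate k (0 : Int)))
      = List.replicate k (List.replicate k (0 : Int)) := by
  simp [pvListify]

-- (b > a) - (b < a): the step direction of a segment
def pvSign (a b : Int) : Int := (if a < b then 1 else 0) - (if b < a then 1 else 0)

-- the set of grid points covered by one segment (nodup; B's test characterizes membership)
def pvSegPts (seg : (Int × Int) × (Int × Int)) : List (Int × Int) :=
  match seg with
  | ((sx, sy), (ex, ey)) =>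
    if pvSign sx ex ≠ 0 ∧ pvSign sy ey ≠ 0 ∧ (sx - ex).natAbs ≠ (sy - ey).natAbs then []
    else
      (PySem.List.pyRange 0 ((max ((sx - ex).natAbs : Int) ((sy - ey).natAbs : Int)) + 1)).map
        (fun i => (sx + i * pvSign sx ex, sy + i * pvSign sy ey))

def pvAllPts (segments : List ((Int × Int) × (Int × Int))) : List (Int × Int) :=
  segments.flatMap pvSegPts

def pvBumpP (m : List (List Int)) (p : Int × Int) : List (List Int) := pvBump m p.1 p.2

def pvShape (m : List (List Int)) (N : Nat) : Prop :=
  m.length = N ∧ ∀ j : Nat, j < N → ((m[j]?.getD []).length = N)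

-- shape lemmas -------------------------------------------------------------

lemma pvBump_shape {m : List (List Int)} {N : Nat} (h : pvShape m N) (r c : Int) :
    pvShape (pvBump m r c) N := by
  obtain ⟨h1, h2⟩ := h
  constructor
  · simp [pvBump, List.length_modify, h1]
  · intro j hj
    have := h2 j hj
    simp only [pvBump, List.getElem?_modify]
    cases hm : m[j]? with
    | none => simp [hm] at this ⊢; exact this
    | some row =>
      simp [hm] at this ⊢
      split_ifs <;> simp [List.length_modify, this]

lemma pvFold_shape {N : Nat} :
    ∀ (L : List (Int × Int)) (m : List (List Int)), pvShape m N →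
      pvShape (L.foldl pvBumpP m) N := by
  intro L
  induction L with
  | nil => intro m h; simpa using h
  | cons p t ih => intro m h; exact ih _ (pvBump_shape h p.1 p.2)

-- reading a cell -----------------------------------------------------------

lemma pvAGet_nonneg (m : List (List Int)) {r c : Int} (hr : 0 ≤ r) (hc : 0 ≤ c) :
    pvAGet m r c = ((m[r.toNat]?.getD [])[c.toNat]?.getD 0) := by
  simp [pvAGet, PySem.List.pyGetD_of_nonneg _ _ hr, PySem.List.pyGetD_of_nonneg _ _ hc,
    List.getD_eq_getElem?_getD]

lemma pvAGetA_eq (m : Array (Array Int)) {r c : Int} (hr : 0 ≤ r) (hc : 0 ≤ c) :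
    pvAGetA m r c = pvAGet (pvListify m) r c := by
  rw [pvAGet_nonneg _ hr hc]
  simp only [pvAGetA]
  rw [if_neg (by omega : ¬ r < 0), if_neg (by omega : ¬ c < 0)]
  have h1 : (pvListify m)[r.toNat]?.getD [] = (m.getD r.toNat #[]).toList := by
    rw [pvListify, List.getElem?_map, Array.getElem?_toList,
      Array.getD_eq_getD_getElem?]
    cases m[r.toNat]? <;> rfl
  rw [h1, Array.getD_eq_getD_getElem?, Array.getElem?_toList]

lemma pvAGet_bump {m : List (List Int)} {N : Nat} (hm : pvShape m N) (p : Int × Int)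
    (hp : 0 ≤ p.1 ∧ p.1 < (N : Int) ∧ 0 ≤ p.2 ∧ p.2 < (N : Int))
    {r c : Int} (hr : 0 ≤ r) (hc : 0 ≤ c) :
    pvAGet (pvBumpP m p) r c = pvAGet m r c + (if p = (r, c) then 1 else 0) := by
  obtain ⟨hp1, hp1', hp2, hp2'⟩ := hp
  obtain ⟨hlen, hrow⟩ := hm
  rw [pvAGet_nonneg _ hr hc, pvAGet_nonneg _ hr hc]
  simp only [pvBumpP, pvBump, List.getElem?_modify]
  have e1 : ∀ L : List (List Int), (if p.1 < 0 then p.1 + (L.length : Int) else p.1) = p.1 :=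
    fun L => if_neg (by omega)
  have e2 : ∀ L : List Int, (if p.2 < 0 then p.2 + (L.length : Int) else p.2) = p.2 :=
    fun L => if_neg (by omega)
  simp only [e1, e2]
  by_cases h1 : p.1 = r
  · have hidx : p.1.toNat = r.toNat := by rw [h1]
    have hrN : r.toNat < m.length := by omega
    rw [List.getElem?_eq_getElem hrN]
    simp only [Option.map_eq_map, Option.map_some, Option.getD_some]
    rw [if_pos hidx]
    have hrowlen : (m[r.toNat]).length = N := by
      have := hrow r.toNat (by omega)
      simpa [List.getElem?_eq_getElem hrN] using this
    rw [List.getElem?_modify]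
    by_cases h2 : p.2 = c
    · have hcN : c.toNat < (m[r.toNat]).length := by omega
      rw [List.getElem?_eq_getElem hcN]
      have hidx2 : p.2.toNat = c.toNat := by rw [h2]
      simp [hidx2, h1, h2, Prod.ext_iff]
    · have hne : p.2.toNat ≠ c.toNat := by omega
      cases hcell : (m[r.toNat])[c.toNat]? <;> simp [hne, h2, Prod.ext_iff]
  · have hne : p.1.toNat ≠ r.toNat := by omega
    have : ¬ p = (r, c) := by simp [Prod.ext_iff]; intro h; exact absurd h h1
    cases hcell : m[r.toNat]? <;> simp [hne, this]

lemma pvFold_bump_get {N : Nat} :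
    ∀ (L : List (Int × Int)) (m : List (List Int)), pvShape m N →
      (∀ p ∈ L, 0 ≤ p.1 ∧ p.1 < (N : Int) ∧ 0 ≤ p.2 ∧ p.2 < (N : Int)) →
      ∀ {r c : Int}, 0 ≤ r → 0 ≤ c →
      pvAGet (L.foldl pvBumpP m) r c = pvAGet m r c + (L.count (r, c) : Int) := by
  intro L
  induction L with
  | nil => intro m hm _ r c hr hc; simp
  | cons p t ih =>
    intro m hm hb r c hr hc
    simp only [List.foldl_cons]
    rw [ih (pvBumpP m p) (pvBump_shape hm p.1 p.2) (fun q hq => hb q (List.mem_cons_of_mem _ hq)) hr hc,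
      pvAGet_bump hm p (hb p (List.mem_cons_self)) hr hc]
    rw [List.count_cons]
    push_cast
    rcases eq_or_ne p (r, c) with h | h
    · simp [h]; ring
    · simp [h, beq_iff_eq]

-- the diagonal loop as a point list -----------------------------------------

def pvDiagPts (fuel : Nat) (x1 y1 x2 y2 : Int) : List (Int × Int) :=
  match fuel with
  | 0 => [(x2, y2)]
  | f + 1 =>
    if x1 ≠ x2 ∧ y1 ≠ y2 then
      (x1, y1) :: pvDiagPts f (if x1 < x2 then x1 + 1 else x1 - 1)
        (if y1 < y2 then y1 + 1 else y1 - 1) x2 y2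
    else [(x2, y2)]

lemma pvDiagGo_eq_fold (fuel : Nat) :
    ∀ (m : List (List Int)) (x1 y1 x2 y2 : Int),
      pvDiagGo fuel m x1 y1 x2 y2 = (pvDiagPts fuel x1 y1 x2 y2).foldl pvBumpP m := by
  induction fuel with
  | zero => intro m x1 y1 x2 y2; simp [pvDiagGo, pvDiagPts, pvBumpP]
  | succ f ih =>
    intro m x1 y1 x2 y2
    by_cases h : x1 ≠ x2 ∧ y1 ≠ y2
    · simp only [pvDiagGo, pvDiagPts, if_pos h, List.foldl_cons]
      rw [ih]
      rfl
    · simp only [pvDiagGo, pvDiagPts, if_neg h]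
      rfl

lemma pvDiagPts_eq_map (fuel : Nat) :
    ∀ (x1 y1 dx dy : Int), (dx = 1 ∨ dx = -1) → (dy = 1 ∨ dy = -1) →
      pvDiagPts fuel x1 y1 (x1 + fuel * dx) (y1 + fuel * dy)
        = (List.range (fuel + 1)).map (fun i : Nat => (x1 + (i : Int) * dx, y1 + (i : Int) * dy)) := by
  induction fuel with
  | zero =>
    intro x1 y1 dx dy _ _
    unfold pvDiagPts
    simp
  | succ f ih =>
    intro x1 y1 dx dy hdx hdy
    have hx : x1 ≠ x1 + (↑(f + 1)) * dx := by rcases hdx with h | h <;> simp [h] <;> omega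
    have hy : y1 ≠ y1 + (↑(f + 1)) * dy := by rcases hdy with h | h <;> simp [h] <;> omega
    simp only [pvDiagPts, if_pos (And.intro hx hy)]
    have hsx : (if x1 < x1 + (↑(f + 1)) * dx then x1 + 1 else x1 - 1) = x1 + dx := by
      rcases hdx with h | h <;> simp [h] <;> omega
    have hsy : (if y1 < y1 + (↑(f + 1)) * dy then y1 + 1 else y1 - 1) = y1 + dy := by
      rcases hdy with h | h <;> simp [h] <;> omega
    rw [hsx, hsy]
    have harg1 : x1 + (↑(f + 1) : Int) * dx = (x1 + dx) + (f : Int) * dx := by push_cast; ring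
    have harg2 : y1 + (↑(f + 1) : Int) * dy = (y1 + dy) + (f : Int) * dy := by push_cast; ring
    rw [harg1, harg2, ih (x1 + dx) (y1 + dy) dx dy hdx hdy]
    conv_rhs => rw [List.range_succ_eq_map]
    simp only [List.map_cons, List.map_map, Nat.cast_zero, zero_mul, add_zero]
    congr 1
    apply List.map_congr_left
    intro i _
    simp only [Function.comp_apply, Nat.cast_succ, Prod.mk.injEq]
    constructor <;> ring

-- per-segment: A's branch is a fold of bumps whose multiset is pvSegPts ------

lemma count_eq_of_nodup_mem {L1 L2 : List (Int × Int)} (h1 : L1.Nodup) (h2 : L2.Nodup)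
    (h : ∀ x, x ∈ L1 ↔ x ∈ L2) (p : Int × Int) : L1.count p = L2.count p := by
  by_cases hp : p ∈ L1
  · rw [List.count_eq_one_of_mem h1 hp, List.count_eq_one_of_mem h2 ((h p).1 hp)]
  · rw [List.count_eq_zero_of_not_mem hp,
      List.count_eq_zero_of_not_mem (fun hx => hp ((h p).2 hx))]

lemma pvSign_spec (a b : Int) :
    (a < b ∧ pvSign a b = 1) ∨ (b < a ∧ pvSign a b = -1) ∨ (a = b ∧ pvSign a b = 0) := by
  unfold pvSign
  rcases lt_trichotomy a b with h | h | h
  · left; exact ⟨h, by rw [if_pos h, if_neg (by omega)]; omega⟩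
  · right; right; exact ⟨h, by rw [if_neg (by omega), if_neg (by omega)]; omega⟩
  · right; left; exact ⟨h, by rw [if_neg (by omega), if_pos h]; omega⟩

lemma nodup_map_pyRange (f : Int → Int × Int) (a b : Int)
    (hf : ∀ i j, a ≤ i → i < b → a ≤ j → j < b → f i = f j → i = j) :
    ((PySem.List.pyRange a b).map f).Nodup := by
  apply List.Nodup.map_on ?_ (PySem.List.nodup_pyRange_one a b)
  intro i hi j hj hij
  rw [PySem.List.mem_pyRange_one] at hi hj
  exact hf i j hi.1 hi.2 hj.1 hj.2 hij

lemma mem_map_pyRange (f : Int → Int × Int) (a b : Int) (q : Int × Int) :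
    q ∈ (PySem.List.pyRange a b).map f ↔ ∃ i, a ≤ i ∧ i < b ∧ f i = q := by
  simp [List.mem_map, PySem.List.mem_pyRange_one, and_assoc]

lemma nodup_pvSegPts (seg : (Int × Int) × (Int × Int)) : (pvSegPts seg).Nodup := by
  obtain ⟨⟨sx, sy⟩, ex, ey⟩ := seg
  simp only [pvSegPts]
  split_ifs with h
  · exact List.nodup_nil
  · apply nodup_map_pyRange
    intro i j hi0 hi1 hj0 hj1 hij
    rw [Prod.mk.injEq] at hij
    rcases pvSign_spec sx ex with ⟨_, hdx⟩ | ⟨_, hdx⟩ | ⟨hxe, hdx⟩ <;>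
      rcases pvSign_spec sy ey with ⟨_, hdy⟩ | ⟨_, hdy⟩ | ⟨hye, hdy⟩ <;>
        rw [hdx, hdy] at hij <;>
          simp only [Int.natAbs_eq_zero] at hi1 hj1 ⊢ <;> omega

lemma mem_pvSegPts_V {sx sy ex ey : Int} (hV : sx = ex) (q : Int × Int) :
    q ∈ pvSegPts ((sx, sy), (ex, ey)) ↔ (q.1 = sx ∧ min sy ey ≤ q.2 ∧ q.2 ≤ max sy ey) := by
  have hdx : pvSign sx ex = 0 := by
    rcases pvSign_spec sx ex with ⟨h, _⟩ | ⟨h, _⟩ | ⟨_, h⟩ <;> omega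
  have hS : (max ((sx - ex).natAbs : Int) ((sy - ey).natAbs : Int)) = ((sy - ey).natAbs : Int) := by
    rw [hV]; simp
  simp only [pvSegPts]
  rw [if_neg (fun hcon => hcon.1 hdx), mem_map_pyRange]
  simp only [hdx, hS, mul_zero, add_zero]
  rcases pvSign_spec sy ey with ⟨h, hdy⟩ | ⟨h, hdy⟩ | ⟨h, hdy⟩ <;> rw [hdy] <;> constructor
  · rintro ⟨i, h0, h1, rfl⟩; first | (simp; omega) | simp
  · rintro ⟨h1, h2, h3⟩
    exact ⟨q.2 - sy, by omega, by omega, by rw [Prod.ext_iff]; constructor <;> simp <;> omega⟩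
  · rintro ⟨i, h0, h1, rfl⟩; first | (simp; omega) | simp
  · rintro ⟨h1, h2, h3⟩
    exact ⟨sy - q.2, by omega, by omega, by rw [Prod.ext_iff]; constructor <;> simp <;> omega⟩
  · rintro ⟨i, h0, h1, rfl⟩; first | (simp; omega) | simp
  · rintro ⟨h1, h2, h3⟩
    exact ⟨0, by omega, by omega, by rw [Prod.ext_iff]; constructor <;> simp <;> omega⟩

lemma mem_pvSegPts_H {sx sy ex ey : Int} (hH : sy = ey) (hne : sx ≠ ex) (q : Int × Int) :
    q ∈ pvSegPts ((sx, sy), (ex, ey)) ↔ (q.2 = sy ∧ min sx ex ≤ q.1 ∧ q.1 ≤ max sx ex) := by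
  have hdy : pvSign sy ey = 0 := by
    rcases pvSign_spec sy ey with ⟨h, _⟩ | ⟨h, _⟩ | ⟨_, h⟩ <;> omega
  have hS : (max ((sx - ex).natAbs : Int) ((sy - ey).natAbs : Int)) = ((sx - ex).natAbs : Int) := by
    rw [hH]; simp
  simp only [pvSegPts]
  rw [if_neg (fun hcon => hcon.2.1 hdy), mem_map_pyRange]
  simp only [hdy, hS, mul_zero, add_zero]
  rcases pvSign_spec sx ex with ⟨h, hdx⟩ | ⟨h, hdx⟩ | ⟨h, hdx⟩ <;> rw [hdx] <;> constructor
  · rintro ⟨i, h0, h1, rfl⟩; first | (simp; omega) | simp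
  · rintro ⟨h1, h2, h3⟩
    exact ⟨q.1 - sx, by omega, by omega, by rw [Prod.ext_iff]; constructor <;> simp <;> omega⟩
  · rintro ⟨i, h0, h1, rfl⟩; first | (simp; omega) | simp
  · rintro ⟨h1, h2, h3⟩
    exact ⟨sx - q.1, by omega, by omega, by rw [Prod.ext_iff]; constructor <;> simp <;> omega⟩
  · exact absurd h hne
  · exact absurd h hne

lemma pvSegPts_D {sx sy ex ey : Int} (hx : sx ≠ ex) (hy : sy ≠ ey)
    (hab : (sx - ex).natAbs = (sy - ey).natAbs) :
    pvSegPts ((sx, sy), (ex, ey))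
      = (List.range ((sx - ex).natAbs + 1)).map
          (fun i : Nat => (sx + (i : Int) * pvSign sx ex, sy + (i : Int) * pvSign sy ey)) := by
  have hdx : pvSign sx ex ≠ 0 := by
    rcases pvSign_spec sx ex with ⟨h, h'⟩ | ⟨h, h'⟩ | ⟨h, h'⟩ <;> omega
  have hdy : pvSign sy ey ≠ 0 := by
    rcases pvSign_spec sy ey with ⟨h, h'⟩ | ⟨h, h'⟩ | ⟨h, h'⟩ <;> omega
  have hS : (max ((sx - ex).natAbs : Int) ((sy - ey).natAbs : Int)) = ((sx - ex).natAbs : Int) := by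
    rw [hab]; simp
  simp only [pvSegPts]
  rw [if_neg (fun hcon => hcon.2.2 hab), hS, PySem.List.pyRange_one]
  have hlen : ((((sx - ex).natAbs : Int)) + 1 - 0).toNat = (sx - ex).natAbs + 1 := by omega
  rw [hlen, List.map_map]
  apply List.map_congr_left
  intro i _
  simp

lemma pvSegPts_skip {sx sy ex ey : Int} (hx : sx ≠ ex) (hy : sy ≠ ey)
    (hab : (sx - ex).natAbs ≠ (sy - ey).natAbs) :
    pvSegPts ((sx, sy), (ex, ey)) = [] := by
  simp only [pvSegPts]
  rw [if_pos]
  refine ⟨?_, ?_, hab⟩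
  · rcases pvSign_spec sx ex with ⟨h, h'⟩ | ⟨h, h'⟩ | ⟨h, h'⟩ <;> omega
  · rcases pvSign_spec sy ey with ⟨h, h'⟩ | ⟨h, h'⟩ | ⟨h, h'⟩ <;> omega

lemma pvASeg_eq_fold (seg : (Int × Int) × (Int × Int)) :
    ∃ L : List (Int × Int), (∀ m, pvASeg m seg = L.foldl pvBumpP m) ∧
      (∀ p, L.count p = (pvSegPts seg).count p) := by
  obtain ⟨⟨sx, sy⟩, ex, ey⟩ := seg
  by_cases hV : sx = ex
  · refine ⟨(PySem.List.pyRange (min sy ey) (max sy ey + 1)).map (fun idx => (sx, idx)), ?_, ?_⟩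
    · intro m
      simp only [pvASeg, if_pos hV]
      rw [List.foldl_map]
      rfl
    · intro p
      apply count_eq_of_nodup_mem
      · exact nodup_map_pyRange _ _ _ (fun i j _ _ _ _ hij => by
          rw [Prod.mk.injEq] at hij; exact hij.2)
      · exact nodup_pvSegPts _
      · intro q
        rw [mem_map_pyRange, mem_pvSegPts_V hV]
        constructor
        · rintro ⟨i, h0, h1, rfl⟩; exact ⟨rfl, by omega, by omega⟩
        · rintro ⟨h1, h2, h3⟩
          exact ⟨q.2, by omega, by omega, by rw [Prod.ext_iff]; exact ⟨h1.symm, rfl⟩⟩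
  · by_cases hH : sy = ey
    · refine ⟨(PySem.List.pyRange (min sx ex) (max sx ex + 1)).map (fun idx => (idx, ey)), ?_, ?_⟩
      · intro m
        simp only [pvASeg, if_neg hV, if_pos hH]
        rw [List.foldl_map]
        rfl
      · intro p
        apply count_eq_of_nodup_mem
        · exact nodup_map_pyRange _ _ _ (fun i j _ _ _ _ hij => by
            rw [Prod.mk.injEq] at hij; exact hij.1)
        · exact nodup_pvSegPts _
        · intro q
          rw [mem_map_pyRange, mem_pvSegPts_H hH hV]
          constructor
          · rintro ⟨i, h0, h1, rfl⟩; exact ⟨hH.symm, by omega, by omega⟩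
          · rintro ⟨h1, h2, h3⟩
            exact ⟨q.1, by omega, by omega, by rw [Prod.ext_iff]; exact ⟨rfl, by omega⟩⟩
    · by_cases hD : (sx - ex).natAbs = (sy - ey).natAbs
      · refine ⟨(List.range ((sx - ex).natAbs + 1)).map
            (fun i : Nat => (sx + (i : Int) * pvSign sx ex, sy + (i : Int) * pvSign sy ey)),
            ?_, ?_⟩
        · intro m
          simp only [pvASeg, if_neg hV, if_neg hH, if_pos hD]
          rw [pvDiagGo_eq_fold]
          have hex : ex = sx + ((sx - ex).natAbs : Int) * pvSign sx ex := by
            rcases pvSign_spec sx ex with ⟨h, h'⟩ | ⟨h, h'⟩ | ⟨h, h'⟩ <;> rw [h'] <;> omega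
          have hey : ey = sy + ((sx - ex).natAbs : Int) * pvSign sy ey := by
            rcases pvSign_spec sy ey with ⟨h, h'⟩ | ⟨h, h'⟩ | ⟨h, h'⟩ <;> rw [h'] <;> omega
          have hdx1 : pvSign sx ex = 1 ∨ pvSign sx ex = -1 := by
            rcases pvSign_spec sx ex with ⟨h, h'⟩ | ⟨h, h'⟩ | ⟨h, h'⟩ <;> omega
          have hdy1 : pvSign sy ey = 1 ∨ pvSign sy ey = -1 := by
            rcases pvSign_spec sy ey with ⟨h, h'⟩ | ⟨h, h'⟩ | ⟨h, h'⟩ <;> omega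
          obtain ⟨F, hF⟩ : ∃ F, F = (sx - ex).natAbs := ⟨_, rfl⟩
          rw [← hF] at hex hey ⊢
          conv_lhs => rw [hex, hey]
          rw [pvDiagPts_eq_map _ _ _ _ _ hdx1 hdy1]
        · intro p
          rw [pvSegPts_D hV hH hD]
      · exact ⟨[], fun m => by simp only [pvASeg, if_neg hV, if_neg hH, if_neg hD]; rfl,
          fun p => by rw [pvSegPts_skip hV hH hD]⟩

lemma pvSegPts_bounds {seg : (Int × Int) × (Int × Int)} {n : Int}
    (h : (seg.1.1 = seg.2.1 ∨ seg.1.2 = seg.2.2 ∨ (seg.1.1 - seg.2.1).natAbs = (seg.1.2 - seg.2.2).natAbs) →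
    (0 ≤ seg.1.1 ∧ seg.1.1 < n ∧ 0 ≤ seg.1.2 ∧ seg.1.2 < n ∧
     0 ≤ seg.2.1 ∧ seg.2.1 < n ∧ 0 ≤ seg.2.2 ∧ seg.2.2 < n)) :
    ∀ p ∈ pvSegPts seg, 0 ≤ p.1 ∧ p.1 < n ∧ 0 ≤ p.2 ∧ p.2 < n := by
  obtain ⟨⟨sx, sy⟩, ex, ey⟩ := seg
  intro p hp
  simp only [pvSegPts] at hp
  by_cases hskip : pvSign sx ex ≠ 0 ∧ pvSign sy ey ≠ 0 ∧ (sx - ex).natAbs ≠ (sy - ey).natAbs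
  · rw [if_pos hskip] at hp; simp at hp
  · rw [if_neg hskip] at hp
    rw [mem_map_pyRange] at hp
    obtain ⟨i, hi0, hi1, rfl⟩ := hp
    have halign : sx = ex ∨ sy = ey ∨ (sx - ex).natAbs = (sy - ey).natAbs := by
      rcases pvSign_spec sx ex with ⟨h1, h1'⟩ | ⟨h1, h1'⟩ | ⟨h1, h1'⟩ <;>
        rcases pvSign_spec sy ey with ⟨h2, h2'⟩ | ⟨h2, h2'⟩ | ⟨h2, h2'⟩ <;>
          simp [h1', h2'] at hskip <;> omega
    have hb := h halign
    simp only at hb ⊢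
    rcases pvSign_spec sx ex with ⟨h1, h1'⟩ | ⟨h1, h1'⟩ | ⟨h1, h1'⟩ <;>
      rcases pvSign_spec sy ey with ⟨h2, h2'⟩ | ⟨h2, h2'⟩ | ⟨h2, h2'⟩ <;>
        rw [h1', h2'] <;> rcases halign with ha | ha | ha <;> simp <;> omega

-- assembling the whole of A ---------------------------------------------------

lemma pvASeg_shape {N : Nat} (seg : (Int × Int) × (Int × Int)) (m : List (List Int))
    (hm : pvShape m N) : pvShape (pvASeg m seg) N := by
  obtain ⟨L, hL, _⟩ := pvASeg_eq_fold seg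
  rw [hL]
  exact pvFold_shape L m hm

lemma pvASeg_get {n : Int} {seg : (Int × Int) × (Int × Int)} (m : List (List Int))
    (hm : pvShape m n.toNat)
    (hseg : (seg.1.1 = seg.2.1 ∨ seg.1.2 = seg.2.2 ∨ (seg.1.1 - seg.2.1).natAbs = (seg.1.2 - seg.2.2).natAbs) →
      (0 ≤ seg.1.1 ∧ seg.1.1 < n ∧ 0 ≤ seg.1.2 ∧ seg.1.2 < n ∧
       0 ≤ seg.2.1 ∧ seg.2.1 < n ∧ 0 ≤ seg.2.2 ∧ seg.2.2 < n))
    {r c : Int} (hr : 0 ≤ r) (hc : 0 ≤ c) :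
    pvAGet (pvASeg m seg) r c = pvAGet m r c + ((pvSegPts seg).count (r, c) : Int) := by
  obtain ⟨L, hL, hcnt⟩ := pvASeg_eq_fold seg
  have hmemL : ∀ p ∈ L, 0 ≤ p.1 ∧ p.1 < (n.toNat : Int) ∧ 0 ≤ p.2 ∧ p.2 < (n.toNat : Int) := by
    intro p hp
    have hp' : p ∈ pvSegPts seg := by
      have h1 : 0 < L.count p := List.count_pos_iff.2 hp
      rw [hcnt] at h1
      exact List.count_pos_iff.1 h1
    have := pvSegPts_bounds hseg p hp'
    omega
  rw [hL, pvFold_bump_get L m hm hmemL hr hc, hcnt]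

lemma pvFoldSegs_get {n : Int} :
    ∀ (segs : List ((Int × Int) × (Int × Int))) (m : List (List Int)), pvShape m n.toNat →
      (∀ seg ∈ segs,
        (seg.1.1 = seg.2.1 ∨ seg.1.2 = seg.2.2 ∨ (seg.1.1 - seg.2.1).natAbs = (seg.1.2 - seg.2.2).natAbs) →
        (0 ≤ seg.1.1 ∧ seg.1.1 < n ∧ 0 ≤ seg.1.2 ∧ seg.1.2 < n ∧
         0 ≤ seg.2.1 ∧ seg.2.1 < n ∧ 0 ≤ seg.2.2 ∧ seg.2.2 < n)) →
      ∀ {r c : Int}, 0 ≤ r → 0 ≤ c →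
      pvAGet (segs.foldl pvASeg m) r c = pvAGet m r c + ((pvAllPts segs).count (r, c) : Int) := by
  intro segs
  induction segs with
  | nil => intro m hm _ r c hr hc; simp [pvAllPts]
  | cons s t ih =>
    intro m hm hb r c hr hc
    simp only [List.foldl_cons]
    rw [ih (pvASeg m s) (pvASeg_shape s m hm) (fun q hq => hb q (List.mem_cons_of_mem _ hq)) hr hc,
      pvASeg_get m hm (hb s List.mem_cons_self) hr hc]
    simp only [pvAllPts, List.flatMap_cons, List.count_append]
    push_cast
    ring

lemma pvShape_grid0 (k : Nat) : pvShape (List.replicate k (List.replicate k (0 : Int))) k := by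
  constructor
  · simp
  · intro j hj
    rw [List.getElem?_replicate, if_pos hj]
    simp

lemma pvAGet_grid0 (k : Nat) {r c : Int} (hr : 0 ≤ r) (hc : 0 ≤ c) :
    pvAGet (List.replicate k (List.replicate k (0 : Int))) r c = 0 := by
  rw [pvAGet_nonneg _ hr hc, List.getElem?_replicate]
  split_ifs with h
  · simp only [Option.getD_some, List.getElem?_replicate]
    split_ifs <;> rfl
  · simp

-- the final count loop of A as a countP over the grid -------------------------

lemma pvA_count_eq (marks : List (List Int)) (n : Int) :
    (PySem.List.pyRange 0 n).foldl (fun count row =>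
      (PySem.List.pyRange 0 n).foldl (fun count col =>
        if 2 ≤ pvAGet marks row col then count + 1 else count) count) 0
    = (((PySem.List.pyRange 0 n) ×ˢ (PySem.List.pyRange 0 n)).countP
        (fun q => decide (2 ≤ pvAGet marks q.1 q.2)) : Int) := by
  rw [PySem.List.foldl_congr_mem _ _
    (fun count row => count + (((PySem.List.pyRange 0 n).countP
      (fun col => decide (2 ≤ pvAGet marks row col)) : Nat) : Int)) 0
    (fun acc row _ => by rw [PySem.List.foldl_ite_add_one])]
  rw [PySem.List.foldl_add, zero_add]
  have : (PySem.List.pyRange 0 n).map (fun row => (((PySem.List.pyRange 0 n).countP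
      (fun col => decide (2 ≤ pvAGet marks row col)) : Nat) : Int))
      = ((PySem.List.pyRange 0 n).map (fun row => (PySem.List.pyRange 0 n).countP
        (fun col => decide (2 ≤ pvAGet marks row col)))).map (fun k : Nat => (k : Int)) := by
    rw [List.map_map]; rfl
  rw [this, ← Nat.cast_list_sum]
  congr 1
  have hprod : (PySem.List.pyRange 0 n) ×ˢ (PySem.List.pyRange 0 n)
      = (PySem.List.pyRange 0 n).flatMap
          (fun row => (PySem.List.pyRange 0 n).map (fun col => (row, col))) := rfl
  rw [hprod, List.countP_flatMap]
  congr 1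
  apply List.map_congr_left
  intro row _
  simp only [Function.comp_apply, List.countP_map]
  rfl

-- B's nested count loop as a countP over the grid ------------------------------

lemma pvB_count_eq (segments : List ((Int × Int) × (Int × Int))) (n : Int) :
    (PySem.List.pyRange 0 n).foldl (fun total x =>
      (PySem.List.pyRange 0 n).foldl (fun total y =>
        if pvAtLeastTwoGo segments x y false then total + 1 else total) total) 0
    = (((PySem.List.pyRange 0 n) ×ˢ (PySem.List.pyRange 0 n)).countP
        (fun q => pvAtLeastTwoGo segments q.1 q.2 false) : Int) := by
  rw [PySem.List.foldl_congr_mem _ _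
    (fun total x => total + (((PySem.List.pyRange 0 n).countP
      (fun y => pvAtLeastTwoGo segments x y false) : Nat) : Int)) 0
    (fun acc x _ => by rw [PySem.List.foldl_if_add_one])]
  rw [PySem.List.foldl_add, zero_add]
  have : (PySem.List.pyRange 0 n).map (fun x => (((PySem.List.pyRange 0 n).countP
      (fun y => pvAtLeastTwoGo segments x y false) : Nat) : Int))
      = ((PySem.List.pyRange 0 n).map (fun x => (PySem.List.pyRange 0 n).countP
        (fun y => pvAtLeastTwoGo segments x y false))).map (fun k : Nat => (k : Int)) := by
    rw [List.map_map]; rfl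
  rw [this, ← Nat.cast_list_sum]
  congr 1
  have hprod : (PySem.List.pyRange 0 n) ×ˢ (PySem.List.pyRange 0 n)
      = (PySem.List.pyRange 0 n).flatMap
          (fun x => (PySem.List.pyRange 0 n).map (fun y => (x, y))) := rfl
  rw [hprod, List.countP_flatMap]
  congr 1
  apply List.map_congr_left
  intro x _
  simp only [Function.comp_apply, List.countP_map]
  rfl

-- B's seen-flag loop counts at least two covering segments ---------------------

lemma pvAtLeastTwoGo_spec (x y : Int) :
    ∀ (segs : List ((Int × Int) × (Int × Int))) (seen : Bool),
      pvAtLeastTwoGo segs x y seen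
        = decide (2 ≤ (if seen then 1 else 0) + segs.countP (fun s => pvCovers s x y)) := by
  intro segs
  induction segs with
  | nil => intro seen; cases seen <;> simp [pvAtLeastTwoGo]
  | cons s t ih =>
    intro seen
    simp only [pvAtLeastTwoGo, List.countP_cons]
    by_cases hc : pvCovers s x y = true
    · rw [if_pos hc, ih true]
      cases seen
      · simp only [Bool.false_eq_true, if_false, if_pos rfl, hc, if_true]
        exact decide_eq_decide.mpr (by omega)
      · simp only [if_pos rfl, hc, if_true]
        symm
        exact decide_eq_true (by omega)
    · rw [if_neg hc, ih seen]
      simp only [hc, if_false]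
      exact decide_eq_decide.mpr (by cases seen <;> simp <;> omega)

-- the cross-product test pins the point to the diagonal through (sx,sy)

lemma pvDiagCross {sx sy ex ey x y : Int} (hne : ¬ sx = ex)
    (hD : (sx - ex).natAbs = (sy - ey).natAbs)
    (hcross : (y - sy) * (ex - sx) = (x - sx) * (ey - sy)) :
    (ey - sy = ex - sx ∧ y - sy = x - sx) ∨
    (ey - sy = -(ex - sx) ∧ y - sy = -(x - sx)) := by
  have hne' : ex - sx ≠ 0 := by omega
  rcases (by omega : ey - sy = ex - sx ∨ ey - sy = -(ex - sx)) with hE | hE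
  · left
    refine ⟨hE, ?_⟩
    rw [hE] at hcross
    exact mul_right_cancel₀ hne' hcross
  · right
    refine ⟨hE, ?_⟩
    rw [hE] at hcross
    have h' : (y - sy) * (ex - sx) = (-(x - sx)) * (ex - sx) := by linear_combination hcross
    exact mul_right_cancel₀ hne' h'

-- B's closed-form test characterizes membership in a segment's point set --------

lemma pvCovers_iff_mem (seg : (Int × Int) × (Int × Int)) (x y : Int) :
    pvCovers seg x y = true ↔ (x, y) ∈ pvSegPts seg := by
  obtain ⟨⟨sx, sy⟩, ex, ey⟩ := seg
  by_cases hV : sx = ex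
  · simp only [pvCovers, if_pos hV, decide_eq_true_eq, mem_pvSegPts_V hV]
  · by_cases hH : sy = ey
    · simp only [pvCovers, if_neg hV, if_pos hH, decide_eq_true_eq, mem_pvSegPts_H hH hV]
    · by_cases hD : (sx - ex).natAbs = (sy - ey).natAbs
      · simp only [pvCovers, if_neg hV, if_neg hH, if_neg (by omega : ¬ (sx - ex).natAbs ≠ (sy - ey).natAbs),
          decide_eq_true_eq]
        rw [pvSegPts_D hV hH hD]
        simp only [List.mem_map, List.mem_range, Prod.mk.injEq]
        rcases pvSign_spec sx ex with ⟨h1, h1'⟩ | ⟨h1, h1'⟩ | ⟨h1, h1'⟩ <;>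
          rcases pvSign_spec sy ey with ⟨h2, h2'⟩ | ⟨h2, h2'⟩ | ⟨h2, h2'⟩ <;>
            first
            | exact absurd h1 hV
            | exact absurd h2 hH
            | (rw [h1', h2']
               constructor
               · rintro ⟨hb1, hb2, hcross⟩
                 have hkey := pvDiagCross hV hD hcross
                 exact ⟨(x - sx).natAbs, by omega, by omega, by omega⟩
               · rintro ⟨i, hi, hx2, hy2⟩
                 refine ⟨by omega, by omega, ?_⟩
                 have hE : (ey - sy = ex - sx ∧ y - sy = x - sx) ∨
                     (ey - sy = -(ex - sx) ∧ y - sy = -(x - sx)) := by omega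
                 rcases hE with ⟨e1, e2⟩ | ⟨e1, e2⟩ <;> rw [e2, e1] <;> ring)
      · rw [pvSegPts_skip hV hH hD]
        simp [pvCovers, if_neg hV, if_neg hH, hD]

-- multiplicity of a point among all covered points = number of covering segments

lemma count_pvAllPts (segs : List ((Int × Int) × (Int × Int))) (q : Int × Int) :
    (pvAllPts segs).count q = segs.countP (fun s => decide (q ∈ pvSegPts s)) := by
  induction segs with
  | nil => simp [pvAllPts]
  | cons s t ih =>
    simp only [pvAllPts, List.flatMap_cons, List.count_append, List.countP_cons]
    rw [show (t.flatMap pvSegPts).count q = (pvAllPts t).count q from rfl, ih]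
    by_cases hm : q ∈ pvSegPts s
    · rw [List.count_eq_one_of_mem (nodup_pvSegPts s) hm]
      simp [hm]
      omega
    · rw [List.count_eq_zero_of_not_mem hm]
      simp [hm]

-- ===== VERDICT (by name: the statement is the Claim_ definition above) =====
theorem calculate_at_least_two_lines_overlapped_for_horizontal_vertical_diagonal_spec : Claim_equal_calculate_at_least_two_lines_overlapped_for_horizontal_vertical_diagonal := by
  intro segments n _ hpre
  unfold Spec_calculate_at_least_two_lines_overlapped_for_horizontal_vertical_diagonal
  unfold calculate_at_least_two_lines_overlapped_for_horizontal_vertical_diagonal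
  unfold calculate_at_least_two_lines_overlapped_for_horizontal_vertical_diagonal_alt
  simp only []
  -- the array port computes the list model cell by cell
  have hmark : pvListify (segments.foldl pvASegA
        (Array.replicate n.toNat (Array.replicate n.toNat (0 : Int))))
      = segments.foldl pvASeg (List.replicate n.toNat (List.replicate n.toNat (0 : Int))) := by
    rw [pvListify_foldSegs, pvListify_replicate]
  rw [PySem.List.foldl_congr_mem _ _
    (fun count row => (PySem.List.pyRange 0 n).foldl (fun count col =>
      if 2 ≤ pvAGet (segments.foldl pvASeg
          (List.replicate n.toNat (List.replicate n.toNat (0 : Int)))) row col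
      then count + 1 else count) count) 0
    (fun acc row hrow => PySem.List.foldl_congr_mem _ _ _ acc
      (fun acc2 col hcol => by
        have h1 := (PySem.List.mem_pyRange_one.mp hrow).1
        have h2 := (PySem.List.mem_pyRange_one.mp hcol).1
        rw [pvAGetA_eq _ h1 h2, hmark]))]
  rw [pvA_count_eq, pvB_count_eq]
  congr 1
  apply List.countP_congr
  intro q hq
  have hq1 : 0 ≤ q.1 ∧ q.1 < n ∧ 0 ≤ q.2 ∧ q.2 < n := by
    obtain ⟨a, b⟩ := q
    have hq2 := List.pair_mem_product.mp hq
    rw [PySem.List.mem_pyRange_one] at hq2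
    rw [PySem.List.mem_pyRange_one] at hq2
    exact ⟨hq2.1.1, hq2.1.2, hq2.2.1, hq2.2.2⟩
  -- A's side: the mark at q is the multiplicity of q among all covered points
  have hget : pvAGet (segments.foldl pvASeg
        (List.replicate n.toNat (List.replicate n.toNat (0 : Int)))) q.1 q.2
      = ((pvAllPts segments).count (q.1, q.2) : Int) := by
    rw [pvFoldSegs_get segments _ (pvShape_grid0 n.toNat) hpre hq1.1 hq1.2.2.1,
      pvAGet_grid0 n.toNat hq1.1 hq1.2.2.1, zero_add]
  -- B's side: the seen-flag loop decides 2 ≤ number of covering segments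
  have hswap : segments.countP (fun s => pvCovers s q.1 q.2)
      = segments.countP (fun s => decide ((q.1, q.2) ∈ pvSegPts s)) :=
    List.countP_congr (fun s _ => by simp [pvCovers_iff_mem])
  rw [pvAtLeastTwoGo_spec q.1 q.2 segments false, hget, hswap,
    count_pvAllPts segments (q.1, q.2)]
  simp only [Bool.false_eq_true, if_false, decide_eq_true_eq]
  push_cast
  omega
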